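-- pv_equiv track=rewrite | github.com/LDirk/GeradorDeDialogosShrek | arquivos_roteiro/tratando_dialogo.py | extrair_dialogos
-- ===== SOURCE A (Python) =====
-- def extrair_dialogos(script):
--     dialogos = []
--     dialogo_atual = {'falas': []}
--
--     for linha in script.split('\n'):
--         linha = linha.strip()
--         if ':' in linha:
--             if dialogo_atual['falas']:
--                 dialogos.append(dialogo_atual)
--                 dialogo_atual = {'falas': []}
--             dialogo_atual['falas'].append(linha + ' ')
--
--     if dialogo_atual['falas']:
--         dialogos.append(dialogo_atual)
--
--     return dialogos
-- ===== SOURCE B (Python) =====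
-- def extrair_dialogos(script):
--     # Divide and conquer over the line list. Correct because A flushes the
--     # pending dialogue before every append, so each colon line forms exactly
--     # one dialogue dict and the results of the two halves simply concatenate.
--     def rec(lines):
--         n = len(lines)
--         if n == 0:
--             return []
--         if n == 1:
--             l = lines[0].strip()
--             return [{'falas': [l + ' ']}] if ':' in l else []
--         mid = n // 2
--         return rec(lines[:mid]) + rec(lines[mid:])
--     return rec(script.split('\n'))
-- ===== Notes on version B (the rewrite author's own statement) =====
-- stated objective: alternative
-- what changed: Replaced A's left-to-right accumulator/flush state machine with a divide-and-conquer recursion on the line list: since A flushes before every append, each colon line yields exactly one dialogue dict, so the halves' results concatenate.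
import Mathlib
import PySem

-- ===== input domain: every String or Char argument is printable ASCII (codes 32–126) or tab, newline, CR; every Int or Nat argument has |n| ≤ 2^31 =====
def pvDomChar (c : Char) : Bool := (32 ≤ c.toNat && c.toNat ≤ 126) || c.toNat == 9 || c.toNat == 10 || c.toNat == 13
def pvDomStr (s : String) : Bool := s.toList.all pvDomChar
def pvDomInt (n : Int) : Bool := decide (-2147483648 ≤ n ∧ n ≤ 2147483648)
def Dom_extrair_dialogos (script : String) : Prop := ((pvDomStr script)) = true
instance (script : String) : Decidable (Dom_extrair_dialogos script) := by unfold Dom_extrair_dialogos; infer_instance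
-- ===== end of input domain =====

-- B replaces A's accumulator/flush state machine by a divide-and-conquer recursion on the
-- line list (each colon line yields exactly one dialogue dict, so halves concatenate).

-- ===== PORT A =====
-- state: (dialogos so far, dialogo_atual's 'falas' list); the dict {'falas': fs} is [("falas", fs)]
def extrair_dialogos_step (st : List (List (String × List String)) × List String) (linha : String) :
    List (List (String × List String)) × List String :=
  let linha := PySem.Str.strip linha
  if PySem.Str.isIn ":" linha then
    let st' := if st.2 ≠ [] then (st.1 ++ [[("falas", st.2)]], ([] : List String)) else st
    (st'.1, st'.2 ++ [linha ++ " "])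
  else st

def extrair_dialogos (script : String) : List (List (String × List String)) :=
  let st := ((PySem.Str.split? script "\n").getD []).foldl extrair_dialogos_step ([], [])
  if st.2 ≠ [] then st.1 ++ [[("falas", st.2)]] else st.1

-- ===== PORT B =====
-- rec(lines): divide and conquer on the line list, exactly as in Source B
def extrair_dialogos_rec (lines : List String) : List (List (String × List String)) :=
  let n := lines.length
  if n = 0 then []
  else if n = 1 then
    let l := PySem.Str.strip ((PySem.List.pyGet? lines 0).getD "")
    if PySem.Str.isIn ":" l then [[("falas", [l ++ " "])]] else []
  else
    extrair_dialogos_rec (lines.take (n / 2)) ++ extrair_dialogos_rec (lines.drop (n / 2))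
termination_by lines.length
decreasing_by
  · simp only [List.length_take]; omega
  · simp only [List.length_drop]; omega

def extrair_dialogos_alt (script : String) : List (List (String × List String)) :=
  extrair_dialogos_rec ((PySem.Str.split? script "\n").getD [])

-- ===== PRECONDITION & SPEC =====
def Spec_extrair_dialogos (script : String) (out : List (List (String × List String))) : Prop := out = extrair_dialogos_alt script
instance (script : String) (out : List (List (String × List String))) : Decidable (Spec_extrair_dialogos script out) := by unfold Spec_extrair_dialogos; infer_instance

-- ===== CLAIM (what is proved, stated in full; the proofs are below) =====
def Claim_equal_extrair_dialogos : Prop := ∀ (script : String), Dom_extrair_dialogos script → Spec_extrair_dialogos script (extrair_dialogos script)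

-- ===== LEMMAS AND PROOFS =====

-- the common normal form both programs compute: one dict per colon-containing stripped line
def pvNorm (lines : List String) : List (List (String × List String)) :=
  (lines.filter (fun l => PySem.Str.isIn ":" (PySem.Str.strip l))).map
    (fun l => [("falas", [PySem.Str.strip l ++ " "])])

lemma pvNorm_append (xs ys : List String) : pvNorm (xs ++ ys) = pvNorm xs ++ pvNorm ys := by
  simp [pvNorm]

-- B computes the normal form (strong induction following the halving recursion)
lemma pvRec_eq (lines : List String) : extrair_dialogos_rec lines = pvNorm lines := by
  fun_induction extrair_dialogos_rec lines with
  | case1 lines n h =>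
    simp [List.eq_nil_of_length_eq_zero h, pvNorm]
  | case2 lines n h0 h1 l hc =>
    obtain ⟨x, rfl⟩ : ∃ x, lines = [x] := List.length_eq_one_iff.mp h1
    have hl : l = PySem.Str.strip x := by
      simp [l, PySem.List.pyGet?, PySem.List.pyIdx?]
    rw [hl] at hc ⊢
    simp at hc
    simp [pvNorm, hc, List.filter_cons]
  | case3 lines n h0 h1 l hc =>
    obtain ⟨x, rfl⟩ : ∃ x, lines = [x] := List.length_eq_one_iff.mp h1
    have hl : l = PySem.Str.strip x := by
      simp [l, PySem.List.pyGet?, PySem.List.pyIdx?]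
    rw [hl] at hc
    simp at hc
    simp [pvNorm, hc, List.filter_cons]
  | case4 lines n h0 h1 ih2 ih1 =>
    rw [ih1, ih2, ← pvNorm_append, List.take_append_drop]

-- finishing a fold state: append the pending dialogue if nonempty
def pvFinish (st : List (List (String × List String)) × List String) :
    List (List (String × List String)) :=
  if st.2 ≠ [] then st.1 ++ [[("falas", st.2)]] else st.1

lemma pvFinish_eq (st : List (List (String × List String)) × List String) :
    pvFinish st = st.1 ++ pvFinish ([], st.2) := by
  unfold pvFinish
  split_ifs <;> simp

-- A's fold computes the normal form too
lemma pv_fold_finish (lines : List String)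
    (ds : List (List (String × List String))) (fs : List String) :
    pvFinish (lines.foldl extrair_dialogos_step (ds, fs)) =
      ds ++ pvFinish ([], fs) ++ pvNorm lines := by
  induction lines generalizing ds fs with
  | nil => simp [pvFinish_eq (ds, fs), pvNorm]
  | cons l rest ih =>
    by_cases h : PySem.Str.isIn ":" (PySem.Str.strip l) = true
    · by_cases hfs : fs = []
      · subst hfs
        simp only [List.foldl_cons, extrair_dialogos_step, h, if_pos, pvNorm, List.filter_cons]
        simp only [h, if_true, ne_eq, not_true_eq_false, List.map_cons]
        rw [show ((rest.filter fun l => PySem.Str.isIn ":" (PySem.Str.strip l)).map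
              fun l => [("falas", [PySem.Str.strip l ++ " "])]) = pvNorm rest from rfl, ih]
        simp [pvFinish]
      · simp only [List.foldl_cons, extrair_dialogos_step, h, if_pos, pvNorm, List.filter_cons]
        simp only [ne_eq, hfs, not_false_eq_true, if_pos, List.map_cons]
        rw [show ((rest.filter fun l => PySem.Str.isIn ":" (PySem.Str.strip l)).map
              fun l => [("falas", [PySem.Str.strip l ++ " "])]) = pvNorm rest from rfl, ih]
        simp [pvFinish, hfs]
    · simp only [List.foldl_cons, extrair_dialogos_step, h, Bool.false_eq_true, if_false, ih,
        pvNorm, List.filter_cons]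

-- ===== VERDICT (by name: the statement is the Claim_ definition above) =====
theorem extrair_dialogos_spec : Claim_equal_extrair_dialogos := by
  intro script _
  unfold Spec_extrair_dialogos extrair_dialogos extrair_dialogos_alt
  rw [pvRec_eq]
  have h := pv_fold_finish ((PySem.Str.split? script "\n").getD []) [] []
  simp only [pvFinish] at h
  simpa using h
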